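-- pv_equiv track=rewrite | github.com/wisent-ai/wisent | wisent/core/geometry/steering/visualization/steering_panels.py | get_eval_colors
-- ===== SOURCE A (Python) =====
-- def get_eval_colors(evaluations, n_points):
--     """Get edge colors based on evaluations."""
--     if evaluations is None:
--         return ['black'] * n_points
--     colors = []
--     for i in range(n_points):
--         if i < len(evaluations):
--             colors.append('green' if evaluations[i] == "TRUTHFUL" else 'red')
--         else:
--             colors.append('black')
--     return colors
-- ===== SOURCE B (Python) =====
-- def get_eval_colors(evaluations, n_points):
--     """Get edge colors based on evaluations."""
--     if evaluations is None:
--         return ['black'] * n_points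
--     # Build the answer back-to-front: pad first, then colors from the tail inward.
--     rev = []
--     i = n_points
--     while i > len(evaluations):
--         rev.append('black')
--         i -= 1
--     while i > 0:
--         rev.append('green' if evaluations[i - 1] == "TRUTHFUL" else 'red')
--         i -= 1
--     rev.reverse()
--     return rev
-- ===== Notes on version B (the rewrite author's own statement) =====
-- stated objective: alternative
-- what changed: Builds the result back-to-front: two countdown while-loops append first the black padding and then the evaluation colors from the tail inward into a reversed buffer, which is reversed once at the end, replacing A's single forward index loop with a per-iteration bounds branch.
import Mathlib
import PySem

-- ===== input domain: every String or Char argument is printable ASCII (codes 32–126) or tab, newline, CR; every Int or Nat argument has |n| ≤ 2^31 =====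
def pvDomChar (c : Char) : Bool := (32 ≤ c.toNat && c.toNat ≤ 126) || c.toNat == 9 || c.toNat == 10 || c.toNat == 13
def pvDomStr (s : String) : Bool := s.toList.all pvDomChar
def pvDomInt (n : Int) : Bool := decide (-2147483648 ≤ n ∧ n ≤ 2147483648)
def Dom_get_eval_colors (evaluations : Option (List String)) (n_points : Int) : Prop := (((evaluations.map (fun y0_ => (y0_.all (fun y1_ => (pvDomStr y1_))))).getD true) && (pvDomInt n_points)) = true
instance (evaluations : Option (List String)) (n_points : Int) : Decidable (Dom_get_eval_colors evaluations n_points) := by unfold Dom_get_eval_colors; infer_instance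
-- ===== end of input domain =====

-- B builds the answer back-to-front (pad, then colors from the tail inward) and reverses once (objective: alternative).

-- ===== PORT A =====
def get_eval_colors (evaluations : Option (List String)) (n_points : Int) : List String :=
  match evaluations with
  | none => List.replicate n_points.toNat "black"
  | some evs =>
    (PySem.List.pyRange 0 n_points 1).foldl
      (fun colors i =>
        if i < (evs.length : Int) then
          colors ++ [if PySem.List.pyGetD evs i "" == "TRUTHFUL" then "green" else "red"]
        else
          colors ++ ["black"]) []

-- ===== PORT B =====
-- first while loop: append 'black' while i > len(evaluations)
def pvPadLoop (L : Int) (rev : List String) (i : Int) : List String × Int :=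
  if i > L then pvPadLoop L (rev ++ ["black"]) (i - 1) else (rev, i)
termination_by (i - L).toNat
decreasing_by omega

-- second while loop: append the color of evaluations[i-1] while i > 0
def pvColorLoop (evs : List String) (rev : List String) (i : Int) : List String :=
  if i > 0 then
    pvColorLoop evs (rev ++ [if PySem.List.pyGetD evs (i - 1) "" == "TRUTHFUL" then "green" else "red"]) (i - 1)
  else rev
termination_by i.toNat
decreasing_by omega

def get_eval_colors_alt (evaluations : Option (List String)) (n_points : Int) : List String :=
  match evaluations with
  | none => List.replicate n_points.toNat "black"
  | some evs =>
    let p := pvPadLoop (evs.length : Int) [] n_points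
    (pvColorLoop evs p.1 p.2).reverse

-- ===== PRECONDITION & SPEC =====
def Spec_get_eval_colors (evaluations : Option (List String)) (n_points : Int) (out : List String) : Prop := out = get_eval_colors_alt evaluations n_points
instance (evaluations : Option (List String)) (n_points : Int) (out : List String) : Decidable (Spec_get_eval_colors evaluations n_points out) := by unfold Spec_get_eval_colors; infer_instance

-- ===== CLAIM (what is proved, stated in full; the proofs are below) =====
def Claim_equal_get_eval_colors : Prop := ∀ (evaluations : Option (List String)) (n_points : Int), Dom_get_eval_colors evaluations n_points → Spec_get_eval_colors evaluations n_points (get_eval_colors evaluations n_points)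

-- ===== LEMMAS AND PROOFS =====

-- A's loop over range(k), in Nat form, equals the mapped clamped prefix plus the black pad.
theorem pvLoopA (evs : List String) (k : Nat) :
    (PySem.List.pyRange 0 (k : Int) 1).foldl
      (fun colors i =>
        if i < (evs.length : Int) then
          colors ++ [if PySem.List.pyGetD evs i "" == "TRUTHFUL" then "green" else "red"]
        else
          colors ++ ["black"]) []
    = ((evs.take (min k evs.length)).map (fun e => if e == "TRUTHFUL" then "green" else "red"))
        ++ List.replicate (k - min k evs.length) "black" := by
  induction k with
  | zero => simp [PySem.List.pyRange_one_eq_nil]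
  | succ k ih =>
    have hsplit : PySem.List.pyRange 0 ((k + 1 : Nat) : Int) 1
        = PySem.List.pyRange 0 (k : Int) 1 ++ [(k : Int)] := by
      have := PySem.List.pyRange_one_succ_right (a := 0) (b := (k : Int)) (by exact_mod_cast Nat.zero_le k)
      simp at this ⊢
      exact this
    rw [hsplit, List.foldl_append, ih]
    simp only [List.foldl_cons, List.foldl_nil]
    by_cases h : k < evs.length
    · have hlt : ((k : Int) < (evs.length : Int)) := by exact_mod_cast h
      have hget : PySem.List.pyGetD evs (k : Int) "" = evs[k] := by
        rw [PySem.List.pyGetD_eq_getElem evs "" (by exact_mod_cast Nat.zero_le k) hlt]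
        simp
      have hm : min (k + 1) evs.length = k + 1 := by omega
      have hm' : min k evs.length = k := by omega
      have htake : evs.take (k + 1) = evs.take k ++ [evs[k]] := by
        simpa using (List.take_concat_get evs k h).symm
      simp only [hget, hm, hm', htake, if_pos hlt]
      simp
      have hk : k < (evs.map (fun e => if e = "TRUTHFUL" then "green" else "red")).length := by
        simpa using h
      simp [List.take_add_one, List.getElem?_eq_getElem hk]
    · have hge : ¬ ((k : Int) < (evs.length : Int)) := by exact_mod_cast h
      have hm : min (k + 1) evs.length = evs.length := by omega
      have hm' : min k evs.length = evs.length := by omega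
      have hrep : List.replicate (k + 1 - evs.length) "black"
          = List.replicate (k - evs.length) "black" ++ ["black"] := by
        have : k + 1 - evs.length = (k - evs.length) + 1 := by omega
        simp [this, List.replicate_succ']
      simp only [hm, hm', hrep]
      simp [hge]

-- the pad loop appends (i-L).toNat blacks and returns i clamped down to L.
theorem pvPadLoop_eq (L : Int) (rev : List String) (i : Int) :
    pvPadLoop L rev i = (rev ++ List.replicate (i - L).toNat "black", min i L) := by
  by_cases h : i > L
  · rw [pvPadLoop, if_pos h, pvPadLoop_eq]
    have h1 : (i - 1 - L).toNat + 1 = (i - L).toNat := by omega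
    have h2 : min (i - 1) L = min i L := by omega
    rw [h2, ← h1, List.replicate_succ]
    simp
  · rw [pvPadLoop, if_neg h]
    have h1 : (i - L).toNat = 0 := by omega
    have h2 : min i L = i := by omega
    simp [h1, h2]
termination_by (i - L).toNat
decreasing_by omega

-- the color loop, started at i ≤ len, appends the reversed mapped prefix of length i.toNat.
theorem pvColorLoop_eq (evs : List String) (rev : List String) (i : Int)
    (hle : i ≤ (evs.length : Int)) :
    pvColorLoop evs rev i
      = rev ++ ((evs.take i.toNat).map (fun e => if e == "TRUTHFUL" then "green" else "red")).reverse := by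
  by_cases h : i > 0
  · rw [pvColorLoop, if_pos h, pvColorLoop_eq evs _ (i - 1) (by omega)]
    have hidx : 0 ≤ i - 1 := by omega
    have hlt : i - 1 < (evs.length : Int) := by omega
    have hn : (i - 1).toNat < evs.length := by omega
    have hget : PySem.List.pyGetD evs (i - 1) "" = evs[(i - 1).toNat] := by
      rw [PySem.List.pyGetD_eq_getElem evs "" hidx hlt]
    have htake : evs.take i.toNat = evs.take (i - 1).toNat ++ [evs[(i - 1).toNat]] := by
      have hi : i.toNat = (i - 1).toNat + 1 := by omega
      rw [hi]
      simpa using (List.take_concat_get evs (i - 1).toNat hn).symm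
    rw [hget, htake]
    simp
    have hk : i.toNat - 1 = (i - 1).toNat := by omega
    have hm : (i - 1).toNat < (evs.map (fun e => if e = "TRUTHFUL" then "green" else "red")).length := by
      simpa using hn
    simp only [hk]
    have ht2 : (evs.map (fun e => if e = "TRUTHFUL" then "green" else "red")).take ((i - 1).toNat + 1)
        = (evs.map (fun e => if e = "TRUTHFUL" then "green" else "red")).take (i - 1).toNat
          ++ [(evs.map (fun e => if e = "TRUTHFUL" then "green" else "red"))[(i - 1).toNat]] := by
      simp [List.take_succ]
      exact ⟨_, List.getElem?_eq_getElem (by omega), rfl⟩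
    rw [ht2]
    simp
  · rw [pvColorLoop, if_neg h]
    have h1 : i.toNat = 0 := by omega
    simp [h1]
termination_by i.toNat
decreasing_by omega

-- ===== VERDICT (by name: the statement is the Claim_ definition above) =====
theorem get_eval_colors_spec : Claim_equal_get_eval_colors := by
  intro evaluations n_points _
  unfold Spec_get_eval_colors
  cases evaluations with
  | none => rfl
  | some evs =>
    dsimp only [get_eval_colors, get_eval_colors_alt]
    rw [pvPadLoop_eq]
    rw [pvColorLoop_eq evs _ (min n_points (evs.length : Int)) (min_le_right _ _)]
    by_cases hn : n_points ≤ 0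
    · have h1 : PySem.List.pyRange 0 n_points 1 = [] :=
        PySem.List.pyRange_one_eq_nil hn
      have h2 : (n_points - (evs.length : Int)).toNat = 0 := by omega
      have h3 : (min n_points (evs.length : Int)).toNat = 0 := by omega
      simp [h1, h2, h3]
    · have hk : n_points = ((n_points.toNat : Nat) : Int) := by omega
      rw [hk, pvLoopA evs n_points.toNat]
      have h2 : (((n_points.toNat : Nat) : Int) - (evs.length : Int)).toNat
          = n_points.toNat - min n_points.toNat evs.length := by omega
      have h3 : (min ((n_points.toNat : Nat) : Int) (evs.length : Int)).toNat
          = min n_points.toNat evs.length := by omega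
      rw [h2, h3]
      simp
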